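-- pv_equiv track=rewrite | github.com/lovit/text_embedding | text_embedding/vectorizer.py | scan_vocabulary
-- ===== SOURCE A (Python) =====
-- from collections import defaultdict
--
-- def scan_vocabulary(sents, min_count):
--     """
--     :param sents: list of list of str (like)
--         utils.Word2VecCorpus
--     :param min_count: int
--         Minimum number of word frequency
--
--     It returns
--     ----------
--     vocab_to_idx: dict {str:int}
--         vocabulary to index mapper
--     idx_to_vocab: list of str
--         vocabluary list
--     """
--
--     counter = defaultdict(int)
--     for sent in sents:
--         for word in sent:
--             counter[word] += 1
--     counter = {word:count for word, count in counter.items()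
--                if count >= min_count}
--     idx_to_vocab = [vocab for vocab in sorted(counter,
--                     key=lambda x:-counter[x])]
--     vocab_to_idx = {vocab:idx for idx, vocab in enumerate(idx_to_vocab)}
--     return vocab_to_idx, idx_to_vocab
-- ===== SOURCE B (Python) =====
-- def scan_vocabulary(sents, min_count):
--     """Bucket (counting) sort over frequencies instead of a comparison sort."""
--     counts = {}
--     for sent in sents:
--         for w in sent:
--             counts[w] = counts.get(w, 0) + 1
--     maxc = 0
--     for c in counts.values():
--         if maxc < c:
--             maxc = c
--     buckets = [[] for _ in range(maxc + 1)]
--     for w, c in counts.items():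
--         if min_count <= c:
--             buckets[c].append(w)
--     idx_to_vocab = []
--     for c in range(maxc, 0, -1):
--         idx_to_vocab.extend(buckets[c])
--     vocab_to_idx = {w: i for i, w in enumerate(idx_to_vocab)}
--     return vocab_to_idx, idx_to_vocab
-- ===== Notes on version B (the rewrite author's own statement) =====
-- stated objective: alternative
-- what changed: Replaces the stable comparison sort by frequency with a counting/bucket sort: words are appended to buckets indexed by their count in dict-insertion order and the buckets are concatenated from the maximum count downwards.
import Mathlib
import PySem

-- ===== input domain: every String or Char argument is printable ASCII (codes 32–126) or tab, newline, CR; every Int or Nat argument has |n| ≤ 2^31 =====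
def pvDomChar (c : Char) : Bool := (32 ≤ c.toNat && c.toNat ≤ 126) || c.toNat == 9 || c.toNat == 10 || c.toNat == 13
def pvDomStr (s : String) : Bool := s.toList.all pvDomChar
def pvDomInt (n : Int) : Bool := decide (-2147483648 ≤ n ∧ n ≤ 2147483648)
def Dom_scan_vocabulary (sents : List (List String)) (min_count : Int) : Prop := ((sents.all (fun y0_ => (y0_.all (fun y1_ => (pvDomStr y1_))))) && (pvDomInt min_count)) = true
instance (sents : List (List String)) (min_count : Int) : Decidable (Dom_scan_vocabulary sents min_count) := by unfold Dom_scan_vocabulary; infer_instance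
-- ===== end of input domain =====

-- B replaces A's stable comparison sort by frequency with a counting/bucket sort
-- (buckets indexed by count, filled in dict-insertion order, concatenated from the
-- maximum count downwards); same return value, similar cost (objective: alternative).

-- ===== PORT A =====
def scan_vocabulary (sents : List (List String)) (min_count : Int) : (List (String × Int)) × List String :=
  let counter := sents.foldl (fun c sent => sent.foldl (fun c word => c.modify word 0 (· + 1)) c) PySem.Dict.empty
  let counter2 := PySem.Dict.ofList (counter.items.filter (fun p => min_count ≤ p.2))
  let idx_to_vocab := PySem.List.sorted counter2.keys (fun x => -(counter2.getD x 0)) false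
  let vocab_to_idx := (PySem.Dict.ofList ((PySem.List.enumerate idx_to_vocab 0).map (fun p => (p.2, p.1)))).items
  (vocab_to_idx, idx_to_vocab)

-- ===== PORT B =====
def scan_vocabulary_alt (sents : List (List String)) (min_count : Int) : (List (String × Int)) × List String :=
  let counts := sents.foldl (fun d sent => sent.foldl (fun d w => d.insert w (d.getD w 0 + 1)) d) PySem.Dict.empty
  let maxc := counts.values.foldl (fun m c => if m < c then c else m) 0
  let buckets0 := (PySem.List.pyRange 0 (maxc + 1) 1).map (fun _ => ([] : List String))
  -- buckets[c].append(w): index c satisfies 1 ≤ c ≤ maxc, always in range, so pySetD/pyGetD are exact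
  let buckets := counts.items.foldl
    (fun bs p => if min_count ≤ p.2 then PySem.List.pySetD bs p.2 (PySem.List.pyGetD bs p.2 [] ++ [p.1]) else bs) buckets0
  let idx_to_vocab := (PySem.List.pyRange maxc 0 (-1)).foldl (fun acc c => acc ++ PySem.List.pyGetD buckets c []) []
  let vocab_to_idx := (PySem.Dict.ofList ((PySem.List.enumerate idx_to_vocab 0).map (fun p => (p.2, p.1)))).items
  (vocab_to_idx, idx_to_vocab)

-- ===== PRECONDITION & SPEC =====
def Spec_scan_vocabulary (sents : List (List String)) (min_count : Int) (out : (List (String × Int)) × List String) : Prop := out = scan_vocabulary_alt sents min_count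
instance (sents : List (List String)) (min_count : Int) (out : (List (String × Int)) × List String) : Decidable (Spec_scan_vocabulary sents min_count out) := by unfold Spec_scan_vocabulary; infer_instance

-- ===== CLAIM (what is proved, stated in full; the proofs are below) =====
def Claim_equal_scan_vocabulary : Prop := ∀ (sents : List (List String)) (min_count : Int), Dom_scan_vocabulary sents min_count → Spec_scan_vocabulary sents min_count (scan_vocabulary sents min_count)

-- ===== LEMMAS AND PROOFS =====

-- the comparison Python's key=lambda x:-count(x) induces on (word, count) pairs
def pvBef : (String × Int) → (String × Int) → Bool := fun a b => decide (-a.2 < -b.2)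

-- descending bucket concatenation: flatMap of the count-c groups for c = m, m-1, …, 1
def pvDfm (m : Int) (t : List (String × Int)) : List (String × Int) :=
  (PySem.List.pyRange m 0 (-1)).flatMap (fun c => t.filter (fun p => p.2 == c))

theorem pv_flatMap_congr {α β : Type} (l : List α) (f g : α → List β)
    (h : ∀ c ∈ l, f c = g c) : l.flatMap f = l.flatMap g := by
  induction l with
  | nil => rfl
  | cons x xs ih =>
    simp only [List.flatMap_cons]
    rw [h x (by simp), ih (fun c hc => h c (by simp [hc]))]

theorem pvDfm_nil (m : Int) : pvDfm m [] = [] := by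
  simp [pvDfm]

theorem pvDfm_append_high (m : Int) (t : List (String × Int)) (p : String × Int)
    (h : m < p.2) : pvDfm m (t ++ [p]) = pvDfm m t := by
  unfold pvDfm
  apply pv_flatMap_congr
  intro c hc
  rw [PySem.List.mem_pyRange_neg_one] at hc
  rw [List.filter_append]
  have hfp : (([p] : List (String × Int)).filter (fun q => q.2 == c)) = [] := by
    have : (p.2 == c) = false := by
      simp only [beq_eq_false_iff_ne, ne_eq]
      omega
    simp [this]
  rw [hfp, List.append_nil]

theorem pv_insertBy_append_left (bef : (String × Int) → (String × Int) → Bool)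
    (x : String × Int) (F R : List (String × Int)) (h : ∀ y ∈ F, bef x y = false) :
    PySem.List.insertBy bef x (F ++ R) = F ++ PySem.List.insertBy bef x R := by
  induction F with
  | nil => rfl
  | cons y F' ih =>
    have hy : bef x y = false := h y (by simp)
    simp only [List.cons_append, PySem.List.insertBy, hy]
    simp only [Bool.false_eq_true, if_false, List.cons.injEq, true_and]
    exact ih (fun z hz => h z (by simp [hz]))

theorem pv_insertBy_all_before (bef : (String × Int) → (String × Int) → Bool)
    (x : String × Int) (R : List (String × Int)) (h : ∀ y ∈ R, bef x y = true) :
    PySem.List.insertBy bef x R = x :: R := by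
  cases R with
  | nil => rfl
  | cons y ys =>
    have hy : bef x y = true := h y (by simp)
    simp [PySem.List.insertBy, hy]

theorem pv_mem_pvDfm_snd_le (m : Int) (t : List (String × Int)) (q : String × Int)
    (hq : q ∈ pvDfm m t) : 1 ≤ q.2 ∧ q.2 ≤ m := by
  unfold pvDfm at hq
  rw [List.mem_flatMap] at hq
  obtain ⟨c, hc, hqc⟩ := hq
  rw [PySem.List.mem_pyRange_neg_one] at hc
  rw [List.mem_filter] at hqc
  have : q.2 = c := by simpa using hqc.2
  omega

theorem pv_insert_into (n : Nat) : ∀ (t : List (String × Int)) (p : String × Int),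
    1 ≤ p.2 → p.2 ≤ (n : Int) →
    PySem.List.insertBy pvBef p (pvDfm (n : Int) t) = pvDfm (n : Int) (t ++ [p]) := by
  induction n with
  | zero => intro t p h1 h2; omega
  | succ n ih =>
    intro t p h1 h2
    have hcons : PySem.List.pyRange ((n : Int) + 1) 0 (-1)
        = ((n : Int) + 1) :: PySem.List.pyRange (n : Int) 0 (-1) := by
      have := PySem.List.pyRange_neg_one_cons (a := (n : Int) + 1) (b := 0) (by omega)
      simpa using this
    have hD : ∀ (s : List (String × Int)), pvDfm ((n : Int) + 1) s
        = s.filter (fun q => q.2 == (n : Int) + 1) ++ pvDfm (n : Int) s := by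
      intro s
      unfold pvDfm
      rw [hcons, List.flatMap_cons]
    rw [Nat.cast_succ] at h2 ⊢
    rw [hD t]
    by_cases hp : p.2 = (n : Int) + 1
    · -- p belongs to the top bucket: pass the bucket, land at its end
      rw [pv_insertBy_append_left]
      · rw [pv_insertBy_all_before]
        · rw [hD (t ++ [p]), List.filter_append]
          have hfp : (([p] : List (String × Int)).filter (fun q => q.2 == (n : Int) + 1)) = [p] := by
            simp [hp]
          rw [hfp, pvDfm_append_high (n : Int) t p (by omega), List.append_assoc]
          rfl
        · intro q hq
          have := pv_mem_pvDfm_snd_le (n : Int) t q hq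
          simp only [pvBef, decide_eq_true_eq]
          omega
      · intro y hy
        rw [List.mem_filter] at hy
        have hy2 : y.2 = (n : Int) + 1 := by simpa using hy.2
        simp only [pvBef, decide_eq_false_iff_not, not_lt]
        omega
    · -- p goes to a lower bucket: pass the top bucket, recurse
      have hp' : p.2 ≤ (n : Int) := by omega
      rw [pv_insertBy_append_left]
      · rw [ih t p h1 hp', hD (t ++ [p]), List.filter_append]
        have hfp : (([p] : List (String × Int)).filter (fun q => q.2 == (n : Int) + 1)) = [] := by
          simp [hp]
        rw [hfp, List.append_nil]
      · intro y hy
        rw [List.mem_filter] at hy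
        have hy2 : y.2 = (n : Int) + 1 := by simpa using hy.2
        simp only [pvBef, decide_eq_false_iff_not, not_lt]
        omega

theorem pv_foldl_insertBy_pvDfm (m : Nat) : ∀ (l t : List (String × Int)),
    (∀ p ∈ l, 1 ≤ p.2 ∧ p.2 ≤ (m : Int)) →
    l.foldl (fun acc x => PySem.List.insertBy pvBef x acc) (pvDfm (m : Int) t)
      = pvDfm (m : Int) (t ++ l) := by
  intro l
  induction l with
  | nil => intro t _; simp
  | cons p l ih =>
    intro t hb
    simp only [List.foldl_cons]
    rw [pv_insert_into m t p (hb p (by simp)).1 (hb p (by simp)).2,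
        ih (t ++ [p]) (fun q hq => hb q (by simp [hq]))]
    simp

theorem pv_sorted_eq_pvDfm (m : Nat) (l : List (String × Int))
    (hb : ∀ p ∈ l, 1 ≤ p.2 ∧ p.2 ≤ (m : Int)) :
    PySem.List.sorted l (fun p => -p.2) false = pvDfm (m : Int) l := by
  rw [PySem.List.sorted_eq_foldl_insertBy]
  have h0 : (List.foldl (fun acc x => PySem.List.insertBy pvBef x acc) (pvDfm (m : Int) []) l)
      = pvDfm (m : Int) ([] ++ l) := pv_foldl_insertBy_pvDfm m l [] hb
  rw [pvDfm_nil, List.nil_append] at h0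
  exact h0

theorem pv_insertBy_map {α β : Type} (f : α → β) (bef : β → β → Bool) (x : α) (acc : List α) :
    PySem.List.insertBy bef (f x) (acc.map f)
      = (PySem.List.insertBy (fun a b => bef (f a) (f b)) x acc).map f := by
  induction acc with
  | nil => rfl
  | cons y ys ih =>
    simp only [List.map_cons, PySem.List.insertBy]
    by_cases h : bef (f x) (f y)
    · simp [h]
    · simp only [h, Bool.false_eq_true, if_false, List.map_cons, List.cons.injEq, true_and]
      exact ih

theorem pv_sorted_map_fst (l : List (String × Int)) (key : String → Int) :
    PySem.List.sorted (l.map Prod.fst) key false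
      = (PySem.List.sorted l (fun p => key p.1) false).map Prod.fst := by
  rw [PySem.List.sorted_eq_foldl_insertBy, PySem.List.sorted_eq_foldl_insertBy]
  have h : ∀ (l' : List (String × Int)) (acc : List (String × Int)),
      (l'.map Prod.fst).foldl (fun acc x => PySem.List.insertBy (fun a b => decide (key a < key b)) x acc) (acc.map Prod.fst)
        = (l'.foldl (fun acc x => PySem.List.insertBy (fun a b => decide (key a.1 < key b.1)) x acc) acc).map Prod.fst := by
    intro l'
    induction l' with
    | nil => intro acc; rfl
    | cons p ps ih =>
      intro acc
      simp only [List.map_cons, List.foldl_cons]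
      rw [pv_insertBy_map Prod.fst (fun a b => decide (key a < key b)) p acc]
      exact ih _
  simpa using h l []

theorem pv_insertBy_congr {α : Type} (bef bef' : α → α → Bool) (x : α) (ys : List α)
    (h : ∀ y ∈ ys, bef x y = bef' x y) :
    PySem.List.insertBy bef x ys = PySem.List.insertBy bef' x ys := by
  induction ys with
  | nil => rfl
  | cons y ys ih =>
    simp only [PySem.List.insertBy]
    rw [h y (by simp), ih (fun z hz => h z (by simp [hz]))]

theorem pv_sorted_congr (l : List (String × Int)) (k k' : (String × Int) → Int)
    (h : ∀ x ∈ l, k x = k' x) :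
    PySem.List.sorted l k false = PySem.List.sorted l k' false := by
  rw [PySem.List.sorted_eq_foldl_insertBy, PySem.List.sorted_eq_foldl_insertBy]
  have hgen : ∀ (l' acc : List (String × Int)),
      (∀ x ∈ l', k x = k' x) → (∀ x ∈ acc, k x = k' x) →
      l'.foldl (fun acc x => PySem.List.insertBy (fun a b => decide (k a < k b)) x acc) acc
        = l'.foldl (fun acc x => PySem.List.insertBy (fun a b => decide (k' a < k' b)) x acc) acc := by
    intro l'
    induction l' with
    | nil => intro acc _ _; rfl
    | cons p ps ih =>
      intro acc hl hacc
      simp only [List.foldl_cons]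
      have hstep : PySem.List.insertBy (fun a b => decide (k a < k b)) p acc
          = PySem.List.insertBy (fun a b => decide (k' a < k' b)) p acc := by
        apply pv_insertBy_congr
        intro y hy
        rw [hl p (by simp), hacc y hy]
      rw [hstep]
      refine ih _ (fun x hx => hl x (by simp [hx])) ?_
      intro x hx
      rw [PySem.List.mem_insertBy] at hx
      rcases hx with rfl | hx
      · exact hl x (by simp)
      · exact hacc x hx
  exact hgen l [] h (by simp)

theorem pv_items_ofList_of_nodup (l : List (String × Int)) (h : (l.map Prod.fst).Nodup) :
    (PySem.Dict.ofList l).items = l := by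
  have := PySem.Dict.items_foldl_insert_fresh l Prod.fst Prod.snd
      (PySem.Dict.empty : PySem.Dict String Int) (fun a _ => rfl) h
  simpa [PySem.Dict.ofList, PySem.Dict.update] using this

theorem pv_le_foldl_max (l : List Int) (b : Int) :
    b ≤ l.foldl (fun m c => if m < c then c else m) b := by
  induction l generalizing b with
  | nil => simp
  | cons x xs ih =>
    simp only [List.foldl_cons]
    refine le_trans ?_ (ih (if b < x then x else b))
    split <;> omega

theorem pv_mem_le_foldl_max (l : List Int) (b x : Int) (hx : x ∈ l) :
    x ≤ l.foldl (fun m c => if m < c then c else m) b := by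
  induction l generalizing b with
  | nil => simp at hx
  | cons y ys ih =>
    simp only [List.foldl_cons]
    rcases List.mem_cons.mp hx with rfl | hx'
    · refine le_trans ?_ (pv_le_foldl_max ys (if b < x then x else b))
      split <;> omega
    · exact ih (if b < y then y else b) hx'

theorem pv_buckets_spec (mc : Int) : ∀ (l : List (String × Int)) (bs : List (List String)),
    (∀ p ∈ l, 0 ≤ p.2 ∧ p.2 < (bs.length : Int)) →
    ∀ (c : Nat), c < bs.length →
    PySem.List.pyGetD
      (l.foldl (fun bs p => if mc ≤ p.2 then PySem.List.pySetD bs p.2 (PySem.List.pyGetD bs p.2 [] ++ [p.1]) else bs) bs)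
      (c : Int) []
      = PySem.List.pyGetD bs (c : Int) []
        ++ (l.filter (fun p => decide (mc ≤ p.2) && p.2 == (c : Int))).map Prod.fst := by
  intro l
  induction l with
  | nil => intro bs _ c _; simp
  | cons p ps ih =>
    intro bs hb c hc
    have hp2 := hb p (by simp)
    simp only [List.foldl_cons, List.filter_cons]
    by_cases hmc : mc ≤ p.2
    · obtain ⟨n, hn⟩ : ∃ n : Nat, p.2 = (n : Int) := ⟨p.2.toNat, by omega⟩
      have hnlt : n < bs.length := by omega
      have hset : PySem.List.pySetD bs p.2 (PySem.List.pyGetD bs p.2 [] ++ [p.1])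
          = bs.set n (PySem.List.pyGetD bs p.2 [] ++ [p.1]) := by
        rw [hn]
        exact PySem.List.pySetD_natCast bs n _
      rw [if_pos hmc, hset,
          ih _ (fun q hq => by simpa using hb q (by simp [hq])) c (by simpa using hc)]
      have hget : PySem.List.pyGetD (bs.set n (PySem.List.pyGetD bs p.2 [] ++ [p.1])) (c : Int) []
          = if c = n then PySem.List.pyGetD bs p.2 [] ++ [p.1] else PySem.List.pyGetD bs (c : Int) [] := by
        have h2 := PySem.List.pyGetD_pySetD_natCast bs n c (PySem.List.pyGetD bs p.2 [] ++ [p.1]) [] hnlt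
        rw [PySem.List.pySetD_natCast] at h2
        exact h2
      rw [hget]
      by_cases hceq : c = n
      · have hbeq : (p.2 == (c : Int)) = true := by
          simp only [beq_iff_eq]
          omega
        rw [if_pos hceq, if_pos (by simp [hmc, hbeq])]
        have hpc : p.2 = (c : Int) := by omega
        rw [hpc, List.append_assoc]
        rfl
      · have hbeq : (p.2 == (c : Int)) = false := by
          simp only [beq_eq_false_iff_ne, ne_eq]
          omega
        rw [if_neg hceq, if_neg (by simp [hbeq])]
    · rw [if_neg hmc, ih bs (fun q hq => hb q (by simp [hq])) c hc,
          if_neg (by simp [hmc])]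

theorem pv_pyGetD_buckets0 (L : List Int) (i : Int) :
    PySem.List.pyGetD (L.map (fun _ => ([] : List String))) i [] = [] := by
  have := PySem.List.pyGetD_map (fun _ => ([] : List String)) L i 0
  simpa using this

-- the heart of the equivalence: A's stable sort of the filtered counter keys by
-- descending count equals B's descending bucket concatenation
theorem pv_idx_eq (mc : Int) (ws : List String) :
    PySem.List.sorted (PySem.Dict.ofList ((PySem.Dict.counter ws).items.filter (fun p => decide (mc ≤ p.2)))).keys
      (fun x => -((PySem.Dict.ofList ((PySem.Dict.counter ws).items.filter (fun p => decide (mc ≤ p.2)))).getD x 0)) false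
    =
    (PySem.List.pyRange ((PySem.Dict.counter ws).values.foldl (fun m c => if m < c then c else m) 0) 0 (-1)).foldl
      (fun acc c => acc ++ PySem.List.pyGetD
        ((PySem.Dict.counter ws).items.foldl
          (fun bs p => if mc ≤ p.2 then PySem.List.pySetD bs p.2 (PySem.List.pyGetD bs p.2 [] ++ [p.1]) else bs)
          ((PySem.List.pyRange 0 (((PySem.Dict.counter ws).values.foldl (fun m c => if m < c then c else m) 0) + 1) 1).map
            (fun _ => ([] : List String)))) c []) [] := by
  set cnt := PySem.Dict.counter ws with hcntdef
  set items := cnt.items with hitemsdef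
  set l := items.filter (fun p => decide (mc ≤ p.2)) with hldef
  set maxc := cnt.values.foldl (fun m c => if m < c then c else m) 0 with hmaxcdef
  set buckets0 := (PySem.List.pyRange 0 (maxc + 1) 1).map (fun _ => ([] : List String)) with hb0def
  set buckets := items.foldl
    (fun bs p => if mc ≤ p.2 then PySem.List.pySetD bs p.2 (PySem.List.pyGetD bs p.2 [] ++ [p.1]) else bs)
    buckets0 with hbdef
  have hmaxc0 : 0 ≤ maxc := pv_le_foldl_max cnt.values 0
  have hbounds : ∀ p ∈ items, 1 ≤ p.2 ∧ p.2 ≤ maxc := by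
    intro p hp
    constructor
    · rw [hitemsdef, PySem.Dict.items_counter ws] at hp
      rw [List.mem_map] at hp
      obtain ⟨k, hk, rfl⟩ := hp
      have hkws : k ∈ ws := (PySem.Set.mem_ofList ws k).mp hk
      have hcount : (1 : Int) ≤ (ws.count k : Int) := by exact_mod_cast List.count_pos_iff.mpr hkws
      simpa using hcount
    · apply pv_mem_le_foldl_max
      have : p.2 ∈ items.map (fun x => x.2) := List.mem_map_of_mem hp
      simpa [PySem.Dict.values, hitemsdef] using this
  have hlbounds : ∀ p ∈ l, 1 ≤ p.2 ∧ p.2 ≤ maxc := by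
    intro p hp
    exact hbounds p (List.mem_of_mem_filter hp)
  -- nodup keys of the filtered dict
  have hknodup : (l.map Prod.fst).Nodup := by
    have h1 : cnt.keys.Nodup := PySem.Dict.nodup_keys_counter ws
    have h1' : (items.map Prod.fst).Nodup := by
      simpa [PySem.Dict.keys, hitemsdef] using h1
    have h2 : List.Sublist (l.map Prod.fst) (items.map Prod.fst) :=
      List.Sublist.map Prod.fst List.filter_sublist
    exact h2.nodup h1'
  have hofl : (PySem.Dict.ofList l).items = l := pv_items_ofList_of_nodup l hknodup
  have hkeys : (PySem.Dict.ofList l).keys = l.map Prod.fst := by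
    rw [PySem.Dict.keys, hofl]
  have hkeyval : ∀ p ∈ l, (PySem.Dict.ofList l).getD p.1 0 = p.2 := by
    intro p hp
    have hmem : (p.1, p.2) ∈ (PySem.Dict.ofList l).items := by rw [hofl]; exact hp
    have hnd : (PySem.Dict.ofList l).keys.Nodup := by rw [hkeys]; exact hknodup
    exact PySem.Dict.getD_of_mem_items _ hmem hnd 0
  -- A's side: stable sort = descending bucket concatenation of the filtered items
  have hcast : ((maxc.toNat : Nat) : Int) = maxc := Int.toNat_of_nonneg hmaxc0
  have hAidx : PySem.List.sorted (PySem.Dict.ofList l).keys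
      (fun x => -((PySem.Dict.ofList l).getD x 0)) false
      = (pvDfm maxc l).map Prod.fst := by
    rw [hkeys, pv_sorted_map_fst l (fun x => -((PySem.Dict.ofList l).getD x 0))]
    rw [pv_sorted_congr l _ (fun p => -p.2) (fun p hp => by rw [hkeyval p hp])]
    rw [pv_sorted_eq_pvDfm maxc.toNat l (by rw [hcast]; exact hlbounds), hcast]
  rw [hAidx]
  -- B's side: the bucket-fill loop, then the descending concatenation loop
  have hb0len : buckets0.length = maxc.toNat + 1 := by
    rw [hb0def]
    rw [List.length_map, PySem.List.length_pyRange_one]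
    omega
  have hblen : ((buckets0.length : Nat) : Int) = maxc + 1 := by
    rw [hb0len]; omega
  rw [PySem.List.foldl_append_eq_flatMap, List.nil_append]
  rw [pvDfm, List.map_flatMap]
  apply pv_flatMap_congr
  intro c hcmem
  rw [PySem.List.mem_pyRange_neg_one] at hcmem
  obtain ⟨n, hn⟩ : ∃ n : Nat, c = (n : Int) := ⟨c.toNat, by omega⟩
  have hnlt : n < buckets0.length := by omega
  have hspec := pv_buckets_spec mc items buckets0
    (fun p hp => ⟨by have := hbounds p hp; omega, by have := hbounds p hp; omega⟩) n hnlt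
  rw [← hbdef, hb0def] at hspec
  rw [pv_pyGetD_buckets0, List.nil_append] at hspec
  rw [hn, hspec]
  -- match the two filters
  rw [hldef, List.filter_filter]
  apply congrArg (List.map Prod.fst)
  apply List.filter_congr
  intro x _
  exact Bool.and_comm _ _

theorem scan_vocabulary_main : ∀ (sents : List (List String)) (min_count : Int),
    scan_vocabulary sents min_count = scan_vocabulary_alt sents min_count := by
  intro sents mc
  have hcnt : sents.foldl (fun c sent => sent.foldl (fun c word => c.modify word 0 (· + 1)) c) PySem.Dict.empty
      = PySem.Dict.counter sents.flatten := by
    rw [PySem.Dict.counter_eq_foldl, List.foldl_flatten]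
  -- B builds the same counter with insert/get (definitionally equal to A's modify)
  have hcntB : sents.foldl (fun d sent => sent.foldl (fun d w => PySem.Dict.insert d w (d.getD w 0 + 1)) d) PySem.Dict.empty
      = PySem.Dict.counter sents.flatten := hcnt
  simp only [scan_vocabulary, scan_vocabulary_alt]
  rw [hcnt, hcntB, pv_idx_eq mc sents.flatten]

-- ===== VERDICT (by name: the statement is the Claim_ definition above) =====
theorem scan_vocabulary_spec : Claim_equal_scan_vocabulary := by
  intro sents mc _
  unfold Spec_scan_vocabulary
  exact scan_vocabulary_main sents mc
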